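-- pv_equiv track=rewrite | github.com/junrui-liu/coding-problems | hackerrank/ransom_note.py | frequent_queries
-- ===== SOURCE A (Python) =====
-- def frequent_queries(qs):
--   from collections import defaultdict
--   count = defaultdict(lambda: 0)
--   freq = defaultdict(lambda: 0)
--   ans = []
--   for q,x in qs:
--     if q == 1:
--       freq[count[x]] -= 1
--       count[x] += 1
--       freq[count[x]] += 1
--     elif q == 2:
--       if count[x] > 0:
--         freq[count[x]] -= 1
--         count[x] -= 1
--         freq[count[x]] += 1
--     elif q == 3:
--       if freq[x] > 0:
--         ans.append(1)
--       else:
--         ans.append(0)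
--     else:
--       raise ValueError("Invalid query")
--   return ans
-- ===== SOURCE B (Python) =====
-- def frequent_queries(qs):
--   count = {}
--   ans = []
--   for q, x in qs:
--     if q == 1:
--       count[x] = count.get(x, 0) + 1
--     elif q == 2:
--       c = count.get(x, 0)
--       if c > 0:
--         count[x] = c - 1
--     elif q == 3:
--       ans.append(1 if x > 0 and x in count.values() else 0)
--     else:
--       raise ValueError("Invalid query")
--   return ans
-- ===== Notes on version B (the rewrite author's own statement) =====
-- stated objective: simpler
-- what changed: B drops A's maintained inverse-frequency table (freq) entirely and keeps only the count dict, answering query 3 by scanning count.values() with an x>0 guard (A's freq[x] is never positive for x<=0).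
import Mathlib
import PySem

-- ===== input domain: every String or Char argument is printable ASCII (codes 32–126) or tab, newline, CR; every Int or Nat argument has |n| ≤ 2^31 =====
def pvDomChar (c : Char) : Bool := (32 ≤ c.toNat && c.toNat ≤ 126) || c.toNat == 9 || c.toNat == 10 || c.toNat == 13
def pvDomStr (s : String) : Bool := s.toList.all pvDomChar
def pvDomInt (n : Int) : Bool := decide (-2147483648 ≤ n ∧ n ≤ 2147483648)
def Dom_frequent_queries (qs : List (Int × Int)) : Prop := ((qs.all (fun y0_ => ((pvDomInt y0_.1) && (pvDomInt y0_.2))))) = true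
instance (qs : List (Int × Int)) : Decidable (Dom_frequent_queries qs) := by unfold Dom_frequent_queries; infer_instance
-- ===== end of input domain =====

-- B keeps only the `count` dict and answers query 3 by scanning its values (with an x>0 guard),
-- instead of maintaining A's inverse-frequency table; simpler, not faster.

-- ===== PORT A =====
-- defaultdict read: inserts the key with the default 0 if absent, returns its value
def pvDdRead (d : PySem.Dict Int Int) (k : Int) : PySem.Dict Int Int × Int :=
  (d.setdefault k 0, d.getD k 0)

def pvStepA (st : PySem.Dict Int Int × PySem.Dict Int Int × List Int) (qx : Int × Int) :
    PySem.Dict Int Int × PySem.Dict Int Int × List Int :=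
  let (count, freq, ans) := st
  let (q, x) := qx
  if q = 1 then
    let (count, c) := pvDdRead count x
    let (freq, f) := pvDdRead freq c
    let freq := freq.insert c (f - 1)
    let count := count.insert x (c + 1)
    let (freq, f2) := pvDdRead freq (c + 1)
    let freq := freq.insert (c + 1) (f2 + 1)
    (count, freq, ans)
  else if q = 2 then
    let (count, c) := pvDdRead count x
    if c > 0 then
      let (freq, f) := pvDdRead freq c
      let freq := freq.insert c (f - 1)
      let count := count.insert x (c - 1)
      let (freq, f2) := pvDdRead freq (c - 1)
      let freq := freq.insert (c - 1) (f2 + 1)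
      (count, freq, ans)
    else (count, freq, ans)
  else if q = 3 then
    let (freq, f) := pvDdRead freq x
    (count, freq, if f > 0 then ans ++ [1] else ans ++ [0])
  else (count, freq, ans)  -- Python raises ValueError here; excluded by Pre_

def frequent_queries (qs : List (Int × Int)) : List Int :=
  (qs.foldl pvStepA (PySem.Dict.empty, PySem.Dict.empty, [])).2.2

-- ===== PORT B =====
def pvStepB (st : PySem.Dict Int Int × List Int) (qx : Int × Int) :
    PySem.Dict Int Int × List Int :=
  let (count, ans) := st
  let (q, x) := qx
  if q = 1 then (count.insert x (count.getD x 0 + 1), ans)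
  else if q = 2 then
    let c := count.getD x 0
    if c > 0 then (count.insert x (c - 1), ans) else (count, ans)
  else if q = 3 then
    (count, ans ++ [if 0 < x ∧ count.values.contains x then 1 else 0])
  else (count, ans)  -- Python raises ValueError here; excluded by Pre_

def frequent_queries_alt (qs : List (Int × Int)) : List Int :=
  (qs.foldl pvStepB (PySem.Dict.empty, [])).2

-- ===== PRECONDITION & SPEC =====
-- Pre_ excludes exactly the inputs containing a query code outside {1,2,3}, on which both A and B raise ValueError.
def Pre_frequent_queries (qs : List (Int × Int)) : Prop :=
  ∀ p ∈ qs, p.1 = 1 ∨ p.1 = 2 ∨ p.1 = 3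
instance (qs : List (Int × Int)) : Decidable (Pre_frequent_queries qs) := by
  unfold Pre_frequent_queries; infer_instance

def pvWitness_frequent_queries : (List (Int × Int)) := [(1, 5), (3, 1), (2, 5), (3, 1)]

def Spec_frequent_queries (qs : List (Int × Int)) (out : List Int) : Prop := out = frequent_queries_alt qs
instance (qs : List (Int × Int)) (out : List Int) : Decidable (Spec_frequent_queries qs out) := by unfold Spec_frequent_queries; infer_instance

-- ===== CLAIM (what is proved, stated in full; the proofs are below) =====
def Claim_equal_frequent_queries : Prop := ∀ (qs : List (Int × Int)), Dom_frequent_queries qs → Pre_frequent_queries qs → Spec_frequent_queries qs (frequent_queries qs)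

-- ===== LEMMAS AND PROOFS =====

-- number of keys of d whose value is v
def pvCnt (d : PySem.Dict Int Int) (v : Int) : Int :=
  ((d.keys.filter (fun k => d.getD k 0 == v)).length : Int)

-- the coupling invariant between A's state (cA, fr) and B's count dict cB
def pvInv (cA fr cB : PySem.Dict Int Int) : Prop :=
  (∀ k, cA.getD k 0 = cB.getD k 0) ∧
  (∀ v, fr.getD v 0 = pvCnt cB v - (if v = 0 then (cB.keys.length : Int) else 0)) ∧
  (∀ k, 0 ≤ cB.getD k 0) ∧
  cB.keys.Nodup

lemma pvGetD_setdefault (d : PySem.Dict Int Int) (k j : Int) :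
    (d.setdefault k 0).getD j 0 = d.getD j 0 := by
  by_cases h : d.contains k = true
  · rw [PySem.Dict.setdefault_of_contains _ _ h]
  · rw [PySem.Dict.setdefault_of_not_contains _ _ (by simpa using h)]
    rw [PySem.Dict.getD_insert]
    split_ifs with hj
    · subst hj; exact (PySem.Dict.getD_of_not_contains _ _ (by simpa using h)).symm
    · rfl

lemma pvFilter_len_update (x : Int) (l : List Int) (p p' : Int → Bool)
    (hx : x ∈ l) (hnd : l.Nodup) (h : ∀ k ∈ l, k ≠ x → p' k = p k) :
    ((l.filter p').length : Int)
      = ((l.filter p).length : Int) - (if p x then 1 else 0) + (if p' x then 1 else 0) := by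
  induction l with
  | nil => cases hx
  | cons a t ih =>
    rcases List.mem_cons.mp hx with rfl | hxt
    · have hnot : x ∉ t := (List.nodup_cons.mp hnd).1
      have ht : ∀ k ∈ t, p' k = p k := by
        intro k hk
        exact h k (List.mem_cons_of_mem _ hk) (fun he => hnot (he ▸ hk))
      have hfe : t.filter p' = t.filter p := List.filter_congr ht
      simp only [List.filter_cons, hfe]
      by_cases hp : p x = true <;> by_cases hp' : p' x = true <;>
        simp [hp, hp'] <;> omega
    · have hax : a ≠ x := fun he => (List.nodup_cons.mp hnd).1 (he ▸ hxt)
      have hpa : p' a = p a := h a (List.mem_cons_self) hax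
      have ih' := ih hxt (List.nodup_cons.mp hnd).2
        (fun k hk hkx => h k (List.mem_cons_of_mem _ hk) hkx)
      simp only [List.filter_cons, hpa]
      by_cases hp : p a = true <;> simp [hp, ih'] <;> omega

lemma pvCnt_insert_mem (d : PySem.Dict Int Int) (x w v : Int)
    (hx : x ∈ d.keys) (hnd : d.keys.Nodup) :
    pvCnt (d.insert x w) v
      = pvCnt d v - (if d.getD x 0 = v then 1 else 0) + (if w = v then 1 else 0) := by
  have hc : d.contains x = true := (PySem.Dict.contains_iff_mem_keys _ _).mpr hx
  unfold pvCnt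
  rw [PySem.Dict.keys_insert_of_contains _ _ hc]
  have := pvFilter_len_update x d.keys
    (fun k => d.getD k 0 == v) (fun k => (d.insert x w).getD k 0 == v) hx hnd
    (by intro k _ hk; simp [PySem.Dict.getD_insert, hk])
  rw [this]
  simp [PySem.Dict.getD_insert_self]

lemma pvCnt_insert_fresh (d : PySem.Dict Int Int) (x w v : Int)
    (hx : x ∉ d.keys) :
    pvCnt (d.insert x w) v = pvCnt d v + (if w = v then 1 else 0) := by
  have hc : d.contains x = false := by
    by_contra h
    exact hx ((PySem.Dict.contains_iff_mem_keys _ _).mp (by simpa using h))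
  unfold pvCnt
  rw [PySem.Dict.keys_insert_of_not_contains _ _ hc]
  rw [List.filter_append]
  have hfe : (d.keys.filter (fun k => (d.insert x w).getD k 0 == v))
      = d.keys.filter (fun k => d.getD k 0 == v) := by
    apply List.filter_congr
    intro k hk
    have : k ≠ x := fun he => hx (he ▸ hk)
    rw [PySem.Dict.getD_insert]; simp [this]
  rw [hfe]
  simp only [List.filter_cons, List.filter_nil, PySem.Dict.getD_insert_self, List.length_append,
    beq_iff_eq]
  by_cases hw : w = v <;> simp [hw]

-- pvCnt at a value no key attains is 0; and pvCnt positive gives membership in values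
lemma pvCnt_pos_iff (d : PySem.Dict Int Int) (v : Int) (hnd : d.keys.Nodup) :
    0 < pvCnt d v ↔ v ∈ d.values := by
  unfold pvCnt
  rw [PySem.Dict.values_eq_map_keys d hnd 0]
  constructor
  · intro h
    have : (d.keys.filter (fun k => d.getD k 0 == v)) ≠ [] := by
      intro he; rw [he] at h; simp at h
    rcases List.exists_mem_of_ne_nil _ this with ⟨k, hk⟩
    have := List.mem_filter.mp hk
    exact List.mem_map.mpr ⟨k, this.1, by simpa using this.2⟩
  · intro h
    rcases List.mem_map.mp h with ⟨k, hk, hv⟩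
    have : k ∈ d.keys.filter (fun k => d.getD k 0 == v) :=
      List.mem_filter.mpr ⟨hk, by simpa using hv⟩
    have := List.length_pos_of_mem this
    exact_mod_cast this

lemma pvCnt_le_len (d : PySem.Dict Int Int) (v : Int) :
    pvCnt d v ≤ (d.keys.length : Int) := by
  unfold pvCnt
  exact_mod_cast List.length_filter_le _ _

lemma pvCnt_nonneg (d : PySem.Dict Int Int) (v : Int) : 0 ≤ pvCnt d v := by
  unfold pvCnt; positivity

-- membership of a key whose value is nonzero
lemma pvMem_keys_of_getD_ne (d : PySem.Dict Int Int) (k : Int) (h : d.getD k 0 ≠ 0) :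
    k ∈ d.keys := by
  by_contra hk
  have hc : d.contains k = false := by
    by_contra hcc
    exact hk ((PySem.Dict.contains_iff_mem_keys _ _).mp (by simpa using hcc))
  exact h (PySem.Dict.getD_of_not_contains _ _ hc)

-- effect of one A-side freq move c -> c' on every getD
lemma pvFreq_step (fr : PySem.Dict Int Int) (c c' v : Int) (hne : c' ≠ c) :
    ((((fr.setdefault c 0).insert c (fr.getD c 0 - 1)).setdefault c' 0).insert c'
        (((fr.setdefault c 0).insert c (fr.getD c 0 - 1)).getD c' 0 + 1)).getD v 0
      = fr.getD v 0 - (if v = c then 1 else 0) + (if v = c' then 1 else 0) := by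
  simp only [PySem.Dict.getD_insert, pvGetD_setdefault]
  by_cases hv1 : v = c'
  · subst hv1; simp [hne]
  · by_cases hv2 : v = c
    · subst hv2; simp [hv1]
    · simp [hv1, hv2]

-- the main simulation lemma
lemma pvMain (qs : List (Int × Int)) (hq : ∀ p ∈ qs, p.1 = 1 ∨ p.1 = 2 ∨ p.1 = 3)
    (cA fr cB : PySem.Dict Int Int) (ans : List Int) (hinv : pvInv cA fr cB) :
    (qs.foldl pvStepA (cA, fr, ans)).2.2 = (qs.foldl pvStepB (cB, ans)).2 := by
  induction qs generalizing cA fr cB ans with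
  | nil => rfl
  | cons p t ih =>
    obtain ⟨q, x⟩ := p
    obtain ⟨h1, h2, h3, h4⟩ := hinv
    have hqt : ∀ p ∈ t, p.1 = 1 ∨ p.1 = 2 ∨ p.1 = 3 :=
      fun p hp => hq p (List.mem_cons_of_mem _ hp)
    simp only [List.foldl_cons]
    rcases hq (q, x) List.mem_cons_self with rfl | rfl | rfl
    · -- q = 1
      simp only [pvStepA, pvStepB, pvDdRead]
      norm_num
      set c := cA.getD x 0 with hc
      have hcB : c = cB.getD x 0 := h1 x
      have hc0 : 0 ≤ c := hcB ▸ h3 x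
      rw [← hcB]
      apply ih hqt
      refine ⟨?_, ?_, ?_, PySem.Dict.nodup_keys_insert _ _ _ h4⟩
      · intro k
        rw [PySem.Dict.getD_insert, PySem.Dict.getD_insert]
        split_ifs with hk
        · rfl
        · rw [pvGetD_setdefault]; exact h1 k
      · intro v
        rw [pvFreq_step fr c (c + 1) v (by omega), h2 v]
        by_cases hx : x ∈ cB.keys
        · rw [pvCnt_insert_mem cB x (c + 1) v hx h4, ← hcB,
            PySem.Dict.keys_insert_of_contains _ _ ((PySem.Dict.contains_iff_mem_keys _ _).mpr hx)]
          split_ifs <;> omega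
        · have hnc : cB.contains x = false := by
            cases hcc : cB.contains x
            · rfl
            · exact absurd ((PySem.Dict.contains_iff_mem_keys _ _).mp hcc) hx
          have hcz : c = 0 := by
            rw [hcB]; exact PySem.Dict.getD_of_not_contains _ _ hnc
          rw [pvCnt_insert_fresh cB x (c + 1) v hx,
            PySem.Dict.keys_insert_of_not_contains _ _ hnc]
          simp only [List.length_append, List.length_cons, List.length_nil]
          push_cast
          split_ifs <;> omega
      · intro k
        rw [PySem.Dict.getD_insert]
        split_ifs with hk
        · omega
        · exact h3 k
    · -- q = 2
      simp only [pvStepA, pvStepB, pvDdRead]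
      norm_num
      set c := cA.getD x 0 with hc
      have hcB : c = cB.getD x 0 := h1 x
      rw [← hcB]
      by_cases hcpos : 0 < c
      · rw [if_pos hcpos, if_pos hcpos]
        apply ih hqt
        have hx : x ∈ cB.keys := pvMem_keys_of_getD_ne cB x (by omega)
        refine ⟨?_, ?_, ?_, PySem.Dict.nodup_keys_insert _ _ _ h4⟩
        · intro k
          rw [PySem.Dict.getD_insert, PySem.Dict.getD_insert]
          split_ifs with hk
          · rfl
          · rw [pvGetD_setdefault]; exact h1 k
        · intro v
          rw [pvFreq_step fr c (c - 1) v (by omega), h2 v]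
          rw [pvCnt_insert_mem cB x (c - 1) v hx h4, ← hcB,
            PySem.Dict.keys_insert_of_contains _ _ ((PySem.Dict.contains_iff_mem_keys _ _).mpr hx)]
          split_ifs <;> omega
        · intro k
          rw [PySem.Dict.getD_insert]
          split_ifs with hk
          · omega
          · exact h3 k
      · rw [if_neg hcpos, if_neg hcpos]
        apply ih hqt
        refine ⟨?_, h2, h3, h4⟩
        intro k
        rw [pvGetD_setdefault]; exact h1 k
    · -- q = 3
      simp only [pvStepA, pvStepB, pvDdRead]
      norm_num
      have hbit : (0 < fr.getD x 0) ↔ (0 < x ∧ x ∈ cB.values) := by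
        rw [h2 x]
        constructor
        · intro h
          have hx0 : x ≠ 0 := by
            intro he; subst he
            have := pvCnt_le_len cB 0
            simp at h; omega
          have hxpos' : 0 < pvCnt cB x := by
            simp [hx0] at h
            have := pvCnt_nonneg cB x; omega
          have hxpos : 0 < x := by
            by_contra hxn
            push_neg at hxn
            have hmem := (pvCnt_pos_iff cB x h4).mp hxpos'
            rw [PySem.Dict.values_eq_map_keys cB h4 0] at hmem
            rcases List.mem_map.mp hmem with ⟨k, _, hv⟩
            have := h3 k
            omega
          exact ⟨hxpos, (pvCnt_pos_iff cB x h4).mp hxpos'⟩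
        · rintro ⟨hxpos, hmem⟩
          have hx0 : x ≠ 0 := by omega
          have := (pvCnt_pos_iff cB x h4).mpr hmem
          simp [hx0]; omega
      have hInv' : pvInv cA (fr.setdefault x 0) cB :=
        ⟨h1, fun v => by rw [pvGetD_setdefault]; exact h2 v, h3, h4⟩
      by_cases hb : 0 < fr.getD x 0
      · rw [if_pos hb, if_pos (hbit.mp hb)]
        exact ih hqt _ _ _ _ hInv'
      · rw [if_neg hb, if_neg (fun hcon => hb (hbit.mpr hcon))]
        exact ih hqt _ _ _ _ hInv'

lemma pvInv_init : pvInv PySem.Dict.empty PySem.Dict.empty PySem.Dict.empty := by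
  refine ⟨fun k => rfl, fun v => ?_, fun k => le_refl 0, by decide⟩
  simp [pvCnt, PySem.Dict.getD_empty, PySem.Dict.keys_empty]

-- ===== VERDICT (by name: the statement is the Claim_ definition above) =====
theorem frequent_queries_spec : Claim_equal_frequent_queries := by
  intro qs _ hpre
  unfold Spec_frequent_queries frequent_queries frequent_queries_alt
  exact pvMain qs hpre _ _ _ _ pvInv_init
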